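-- pv_equiv track=rewrite | github.com/Abdelkawy16/Specialization---UCSanDiego---Data-Structures-and-Algorithms-Specialization-repository | 01. algorithmic-toolbox/03_greedy-algorithms/implementation/celebration-party-problem-naive.py | check_if_partition_possible
-- ===== SOURCE A (Python) =====
-- from itertools import product
--
-- def check_if_partition_possible(k, x, n):
--   for partition in product(list(range(k)), repeat=n):
--     G = [[] for i in range(k)]
--     # prepare the groups, G[i] contains the coordinates of
--     # the children in the ith group
--     for i in range(n):
--       G[partition[i]].append(x[i])
--     good = True
--     for i in range(k):
--       if len(G[i]) == 0 or max(G[i]) - min(G[i]) > 1: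
--         good = False
--     if good:
--       return True
--   return False
-- ===== SOURCE B (Python) =====
-- def check_if_partition_possible(k, x, n):
--     xs = sorted(x[:n])
--     m = 0
--     i = 0
--     L = len(xs)
--     while i < L:
--         m += 1
--         base = xs[i]
--         while i < L and xs[i] - base <= 1:
--             i += 1
--     return m <= k <= n
-- ===== Notes on version B (the rewrite author's own statement) =====
-- stated objective: alternative
-- what changed: Replaced the exhaustive k^n search over all group assignments by sort + one greedy scan counting the minimum number m of range-<=1 groups, returning m <= k <= n.
-- intended difference: For k < 0 with n = 0 A returns True (its empty product admits the empty assignment and the group check is vacuous), while B returns False because a partition into a negative number of groups is impossible, which is the intended answer. — e.g. on check_if_partition_possible(-1, [], 0): A returns true, B returns false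
-- outside the precondition, e.g. on check_if_partition_possible(0, [], 1): A returns False, B returns True
import Mathlib
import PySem

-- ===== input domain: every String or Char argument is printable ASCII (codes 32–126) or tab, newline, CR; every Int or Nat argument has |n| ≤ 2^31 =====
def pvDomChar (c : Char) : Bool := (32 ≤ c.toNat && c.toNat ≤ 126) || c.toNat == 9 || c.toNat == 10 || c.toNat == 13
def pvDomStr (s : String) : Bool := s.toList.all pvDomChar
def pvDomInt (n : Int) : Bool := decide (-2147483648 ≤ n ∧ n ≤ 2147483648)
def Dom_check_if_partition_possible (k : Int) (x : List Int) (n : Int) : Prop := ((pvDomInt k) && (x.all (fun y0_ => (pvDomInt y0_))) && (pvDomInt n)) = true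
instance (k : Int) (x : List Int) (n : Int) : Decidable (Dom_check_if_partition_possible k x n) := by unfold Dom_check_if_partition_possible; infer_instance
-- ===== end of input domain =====

-- B replaces A's exhaustive search over all k^n group assignments by a different algorithm:
-- sort + one greedy scan (minimum group count m, answer m ≤ k ≤ n), same return value.

-- ===== PORT A =====
-- G[j].append(v) for the group list G (index j is a Python int in range(k), always in range)
def pvAppendAt : List (List Int) → Int → Int → List (List Int)
  | [], _, _ => []
  | g :: gs, j, v => if j = 0 then (g ++ [v]) :: gs else g :: pvAppendAt gs (j - 1) v

-- itertools.product(pool, repeat=m), in Python's order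
def pvProd (pool : List Int) : Nat → List (List Int)
  | 0 => [[]]
  | m + 1 => pool.flatMap (fun a => (pvProd pool m).map (fun t => a :: t))

-- 'G = [[] for i in range(k)]' then 'for i in range(n): G[partition[i]].append(x[i])'
def pvAssign (x : List Int) (p : List Int) (k : Int) (n : Nat) : List (List Int) :=
  (List.range n).foldl
    (fun G (i : Nat) => pvAppendAt G ((PySem.List.pyGet? p (i : Int)).getD 0) ((PySem.List.pyGet? x (i : Int)).getD 0))
    (List.replicate k.toNat [])

-- 'good': no i in range(k) with len(G[i]) == 0 or max(G[i]) - min(G[i]) > 1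
def pvGood (k : Int) (G : List (List Int)) : Bool :=
  (PySem.List.pyRange 0 k 1).all (fun i =>
    let g := (PySem.List.pyGet? G i).getD []
    !(g.isEmpty || decide (1 < ((PySem.List.max? g (fun y => y)).getD 0 - (PySem.List.min? g (fun y => y)).getD 0))))

def check_if_partition_possible (k : Int) (x : List Int) (n : Int) : Bool :=
  (pvProd (PySem.List.pyRange 0 k 1) n.toNat).any (fun p => pvGood k (pvAssign x p k n.toNat))

-- ===== PORT B =====
-- outer while loop of Source B: m += 1, then the inner while skips the block of values within 1 of its base
def pvGreedyGo : Int → List Int → Int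
  | _, [] => 0
  | base, y :: rest => if y - base ≤ 1 then pvGreedyGo base rest else 1 + pvGreedyGo y rest

def pvGreedyCount : List Int → Int
  | [] => 0
  | a :: rest => 1 + pvGreedyGo a rest

def check_if_partition_possible_alt (k : Int) (x : List Int) (n : Int) : Bool :=
  let xs := PySem.List.sorted (PySem.List.slice x none (some n)) (fun y => y) false
  decide (pvGreedyCount xs ≤ k ∧ k ≤ n)

-- ===== PRECONDITION & SPEC =====
-- Pre_ excludes n < 0 (A raises ValueError), n > len(x) with k > 0 (A raises IndexError), and
-- the degenerate corner n > len(x) with k = 0 and x = [], where A returns False without ever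
-- reading x while B's True is equally accidental: out-of-range n makes both values artefacts.
def Pre_check_if_partition_possible (k : Int) (x : List Int) (n : Int) : Prop :=
  0 ≤ n ∧ (n ≤ (x.length : Int) ∨ (k ≤ 0 ∧ ¬(k = 0 ∧ x = [])))
instance (k : Int) (x : List Int) (n : Int) : Decidable (Pre_check_if_partition_possible k x n) := by
  unfold Pre_check_if_partition_possible; infer_instance

def pvWitness_check_if_partition_possible : Int × List Int × Int := (2, [1, 2, 5], 3)

-- For k < 0 with n = 0 A returns True (empty assignment, vacuous group check) while B returns
-- False, the intended answer: a partition into a negative number of groups is impossible.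
def D_check_if_partition_possible (k : Int) (x : List Int) (n : Int) : Prop := k < 0 ∧ n = 0
instance (k : Int) (x : List Int) (n : Int) : Decidable (D_check_if_partition_possible k x n) := by
  unfold D_check_if_partition_possible; infer_instance

def Spec_check_if_partition_possible (k : Int) (x : List Int) (n : Int) (out : Bool) : Prop :=
  ¬ D_check_if_partition_possible k x n → out = check_if_partition_possible_alt k x n
instance (k : Int) (x : List Int) (n : Int) (out : Bool) : Decidable (Spec_check_if_partition_possible k x n out) := by
  unfold Spec_check_if_partition_possible; infer_instance

def pvDiffWitness_check_if_partition_possible : Int × List Int × Int := (-1, [], 0)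
def pvDiffWitnessOut_check_if_partition_possible : Bool × Bool := (true, false)

-- ===== CLAIM (what is proved, stated in full; the proofs are below) =====
def Claim_unchanged_check_if_partition_possible : Prop := ∀ (k : Int) (x : List Int) (n : Int), Dom_check_if_partition_possible k x n → Pre_check_if_partition_possible k x n → Spec_check_if_partition_possible k x n (check_if_partition_possible k x n)
def Claim_changed_check_if_partition_possible : Prop := Dom_check_if_partition_possible (pvDiffWitness_check_if_partition_possible.1) (pvDiffWitness_check_if_partition_possible.2.1) (pvDiffWitness_check_if_partition_possible.2.2) ∧ Pre_check_if_partition_possible (pvDiffWitness_check_if_partition_possible.1) (pvDiffWitness_check_if_partition_possible.2.1) (pvDiffWitness_check_if_partition_possible.2.2) ∧ D_check_if_partition_possible (pvDiffWitness_check_if_partition_possible.1) (pvDiffWitness_check_if_partition_possible.2.1) (pvDiffWitness_check_if_partition_possible.2.2) ∧ check_if_partition_possible (pvDiffWitness_check_if_partition_possible.1) (pvDiffWitness_check_if_partition_possible.2.1) (pvDiffWitness_check_if_partition_possible.2.2) = pvDiffWitnessOut_check_if_partition_possible.1 ∧ check_if_partition_possible_alt (pvDiffWitness_check_if_partition_possible.1)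 (pvDiffWitness_check_if_partition_possible.2.1) (pvDiffWitness_check_if_partition_possible.2.2) = pvDiffWitnessOut_check_if_partition_possible.2 ∧ pvDiffWitnessOut_check_if_partition_possible.1 ≠ pvDiffWitnessOut_check_if_partition_possible.2
def Claim_exact_check_if_partition_possible : Prop := ∀ (k : Int) (x : List Int) (n : Int), Dom_check_if_partition_possible k x n → Pre_check_if_partition_possible k x n → D_check_if_partition_possible k x n → check_if_partition_possible k x n ≠ check_if_partition_possible_alt k x n

-- ===== LEMMAS AND PROOFS =====

-- diameter-≤1 predicate, permutation-invariant form of 'max - min ≤ 1' for nonempty lists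
def diampred (g : List Int) : Prop := ∀ u ∈ g, ∀ v ∈ g, u - v ≤ 1

-- there is a partition of (the multiset of) l into exactly kk nonempty diameter-≤1 groups
def Epart (kk : Nat) (l : List Int) : Prop :=
  ∃ G : List (List Int), G.length = kk ∧ (∀ g ∈ G, g ≠ [] ∧ diampred g) ∧ G.flatten.Perm l

-- greedy minimum-group count, defined on an arbitrary list via its minimum value
def gcountL (l : List Int) : Nat :=
  match h : PySem.List.min? l (fun y => y) with
  | none => 0
  | some a => 1 + gcountL (l.filter (fun y => decide (a + 1 < y)))
termination_by l.length
decreasing_by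
  have ha : a ∈ l := PySem.List.min?_mem h
  rw [show l.length = l.attach.length from (List.length_attach (l := l)).symm]
  rw [List.length_unattach]
  apply List.length_filter_lt_length_iff_exists.mpr
  refine ⟨⟨a, ha⟩, List.mem_attach l ⟨a, ha⟩, ?_⟩
  simp only [decide_eq_true_eq]
  omega

-- group j of the assignment p over the elements l
def agroup (l p : List Int) (j : Nat) : List Int :=
  (l.zip p).filterMap (fun vq => if vq.2 = (j : Int) then some vq.1 else none)

def zfold (l p : List Int) (G : List (List Int)) : List (List Int) :=
  (l.zip p).foldl (fun G vq => pvAppendAt G vq.2 vq.1) G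

theorem gcount_none {l : List Int} (h : PySem.List.min? l (fun y => y) = none) : gcountL l = 0 := by
  rw [gcountL]
  split
  · rfl
  · next a h' => rw [h] at h'; cases h'

theorem gcount_some {l : List Int} {a : Int} (h : PySem.List.min? l (fun y => y) = some a) :
    gcountL l = 1 + gcountL (l.filter (fun y => decide (a + 1 < y))) := by
  rw [gcountL]
  split
  · next h' => rw [h] at h'; cases h'
  · next b h' => rw [h] at h'; cases h'; rfl

theorem gcount_nil : gcountL [] = 0 :=
  gcount_none (by rw [PySem.List.min?_eq_none_iff])

theorem filter_min_lt_length {l : List Int} {a : Int} (h : PySem.List.min? l (fun y => y) = some a) :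
    (l.filter (fun y => decide (a + 1 < y))).length < l.length := by
  apply List.length_filter_lt_length_iff_exists.mpr
  exact ⟨a, PySem.List.min?_mem h, by simp only [decide_eq_true_eq]; omega⟩

theorem min?_eq_min?_of_perm {l l' : List Int} (h : l.Perm l') :
    PySem.List.min? l (fun y => y) = PySem.List.min? l' (fun y => y) := by
  cases hm : PySem.List.min? l (fun y => y) with
  | none =>
    rw [PySem.List.min?_eq_none_iff] at hm
    subst hm
    rw [(PySem.List.min?_eq_none_iff _ _).mpr (h.nil_eq).symm]
  | some a =>
    cases hm' : PySem.List.min? l' (fun y => y) with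
    | none =>
      rw [PySem.List.min?_eq_none_iff] at hm'
      subst hm'
      rw [(PySem.List.min?_eq_none_iff _ _).mpr h.symm.nil_eq.symm] at hm
      cases hm
    | some b =>
      have ha : a ∈ l := PySem.List.min?_mem hm
      have hb : b ∈ l' := PySem.List.min?_mem hm'
      have h1 : a ≤ b := PySem.List.min?_isMin hm b (h.mem_iff.mpr hb)
      have h2 : b ≤ a := PySem.List.min?_isMin hm' a (h.mem_iff.mp ha)
      have hab : a = b := by simp only at h1 h2; omega
      rw [hab]

theorem gcount_perm {l l' : List Int} (h : l.Perm l') : gcountL l = gcountL l' := by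
  cases hm : PySem.List.min? l (fun y => y) with
  | none => rw [gcount_none hm, gcount_none ((min?_eq_min?_of_perm h).symm.trans hm)]
  | some a =>
    have hm' : PySem.List.min? l' (fun y => y) = some a := (min?_eq_min?_of_perm h).symm.trans hm
    rw [gcount_some hm, gcount_some hm']
    exact congrArg (1 + ·) (gcount_perm (h.filter _))
termination_by l.length
decreasing_by exact filter_min_lt_length hm

theorem gcount_le_length (l : List Int) : gcountL l ≤ l.length := by
  cases hm : PySem.List.min? l (fun y => y) with
  | none => rw [gcount_none hm]; omega
  | some a =>
    rw [gcount_some hm]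
    have h1 := filter_min_lt_length hm
    have h2 := gcount_le_length (l.filter (fun y => decide (a + 1 < y)))
    omega
termination_by l.length
decreasing_by exact filter_min_lt_length hm

theorem filter_subperm_filter_of_le {l₁ l₂ : List Int} {a b : Int} (h : l₁.Subperm l₂) (hab : a ≤ b) :
    (l₁.filter (fun y => decide (b + 1 < y))).Subperm (l₂.filter (fun y => decide (a + 1 < y))) := by
  have h1 : (l₁.filter (fun y => decide (b + 1 < y))).Subperm
      (l₂.filter (fun y => decide (b + 1 < y))) := h.filter _
  have h2 : l₂.filter (fun y => decide (b + 1 < y)) =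
      (l₂.filter (fun y => decide (a + 1 < y))).filter (fun y => decide (b + 1 < y)) := by
    rw [List.filter_filter]
    apply List.filter_congr
    intro y _
    by_cases hby : b + 1 < y
    · have : a + 1 < y := by omega
      simp [hby, this]
    · simp [hby]
  refine h1.trans ?_
  rw [h2]
  exact List.filter_sublist.subperm

theorem gcount_mono {l₁ l₂ : List Int} (h : l₁.Subperm l₂) : gcountL l₁ ≤ gcountL l₂ := by
  cases hm₁ : PySem.List.min? l₁ (fun y => y) with
  | none => rw [gcount_none hm₁]; omega
  | some b =>
    have hb : b ∈ l₂ := h.subset (PySem.List.min?_mem hm₁)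
    cases hm₂ : PySem.List.min? l₂ (fun y => y) with
    | none =>
      rw [PySem.List.min?_eq_none_iff] at hm₂
      subst hm₂
      cases hb
    | some a =>
      have hab : a ≤ b := PySem.List.min?_isMin hm₂ b hb
      rw [gcount_some hm₁, gcount_some hm₂]
      have := gcount_mono (filter_subperm_filter_of_le h hab)
      omega
termination_by l₂.length
decreasing_by exact filter_min_lt_length hm₂

theorem gcount_pos {l : List Int} (h : l ≠ []) : 1 ≤ gcountL l := by
  cases hm : PySem.List.min? l (fun y => y) with
  | none => rw [PySem.List.min?_eq_none_iff] at hm; exact absurd hm h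
  | some a => rw [gcount_some hm]; omega

theorem length_le_flatten_length {G : List (List Int)} (h : ∀ g ∈ G, g ≠ []) :
    G.length ≤ G.flatten.length := by
  induction G with
  | nil => simp
  | cons g gs ih =>
    have hg : g ≠ [] := h g (by simp)
    have h1 : 1 ≤ g.length := by
      cases g with
      | nil => exact absurd rfl hg
      | cons _ _ => simp
    have h2 := ih (fun g' hg' => h g' (by simp [hg']))
    simp only [List.flatten_cons, List.length_append, List.length_cons]
    omega

theorem Epart_mbound {kk : Nat} {l : List Int} (h : Epart kk l) : gcountL l ≤ kk := by
  obtain ⟨G, hlen, hok, hperm⟩ := h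
  cases hm : PySem.List.min? l (fun y => y) with
  | none => rw [gcount_none hm]; omega
  | some a =>
    have ha : a ∈ l := PySem.List.min?_mem hm
    have haf : a ∈ G.flatten := hperm.mem_iff.mpr ha
    obtain ⟨g, hgG, hag⟩ := List.mem_flatten.mp haf
    have hGp : G.Perm (g :: G.erase g) := List.perm_cons_erase hgG
    have hfl : l.Perm (g ++ (G.erase g).flatten) := by
      refine (hperm.symm.trans ?_)
      simpa using hGp.flatten
    have hgnil : g ≠ [] := (hok g hgG).1
    have hgd : diampred g := (hok g hgG).2
    -- the group containing the minimum contributes nothing to the filtered list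
    have hgf : g.filter (fun y => decide (a + 1 < y)) = [] := by
      rw [List.filter_eq_nil_iff]
      intro y hy
      have := hgd y hy a hag
      simp only [decide_eq_true_eq]
      omega
    have hfperm : (l.filter (fun y => decide (a + 1 < y))).Perm
        (((G.erase g).flatten).filter (fun y => decide (a + 1 < y))) := by
      have := hfl.filter (fun y => decide (a + 1 < y))
      rwa [List.filter_append, hgf, List.nil_append] at this
    have hrec : Epart (kk - 1) (G.erase g).flatten :=
      ⟨G.erase g, by rw [List.length_erase_of_mem hgG, hlen],
        fun g' hg' => hok g' (List.mem_of_mem_erase hg'), List.Perm.refl _⟩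
    have hlt : (G.erase g).flatten.length < l.length := by
      have h1 := hfl.length_eq
      have h2 : 1 ≤ g.length := by
        cases g with
        | nil => exact absurd rfl hgnil
        | cons _ _ => simp
      simp only [List.length_append] at h1
      omega
    have hih := Epart_mbound hrec
    have hmono : gcountL (((G.erase g).flatten).filter (fun y => decide (a + 1 < y))) ≤
        gcountL (G.erase g).flatten := gcount_mono List.filter_sublist.subperm
    have hkk : 1 ≤ kk := by
      have : G ≠ [] := fun hG => by subst hG; cases hgG
      cases G with
      | nil => exact absurd rfl this
      | cons _ _ => rw [← hlen]; simp
    rw [gcount_some hm, gcount_perm hfperm]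
    omega
termination_by l.length
decreasing_by exact hlt
theorem Epart_kbound {kk : Nat} {l : List Int} (h : Epart kk l) : kk ≤ l.length := by
  obtain ⟨G, hlen, hok, hperm⟩ := h
  have := length_le_flatten_length (G := G) (fun g hg => (hok g hg).1)
  rw [hlen, hperm.length_eq] at this
  exact this
theorem splitList (t : Nat) (B : List Int) (h1 : 1 ≤ t) (h2 : t ≤ B.length) :
    ∃ Gs : List (List Int), Gs.length = t ∧ (∀ g ∈ Gs, g ≠ []) ∧ Gs.flatten = B := by
  induction t generalizing B with
  | zero => omega
  | succ t ih =>
    cases t with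
    | zero =>
      refine ⟨[B], by simp, ?_, by simp⟩
      intro g hg
      simp only [List.mem_singleton] at hg
      subst hg
      intro hB
      subst hB
      simp at h2
    | succ t' =>
      cases B with
      | nil => simp at h2
      | cons b B' =>
        obtain ⟨Gs, hl, hne, hfl⟩ := ih B' (by omega) (by simp at h2 ⊢; omega)
        exact ⟨[b] :: Gs, by simp [hl], by
          intro g hg
          simp only [List.mem_cons] at hg
          rcases hg with h | h
          · subst h; simp
          · exact hne g h, by simp [hfl]⟩
theorem Epart_of_bounds {kk : Nat} {l : List Int} (h1 : gcountL l ≤ kk) (h2 : kk ≤ l.length) :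
    Epart kk l := by
  cases hm : PySem.List.min? l (fun y => y) with
  | none =>
    rw [PySem.List.min?_eq_none_iff] at hm
    subst hm
    simp only [List.length_nil, Nat.le_zero] at h2
    subst h2
    exact ⟨[], rfl, by simp, List.Perm.refl _⟩
  | some a =>
    have ha : a ∈ l := PySem.List.min?_mem hm
    set rest := l.filter (fun y => decide (a + 1 < y)) with hrest
    set B := l.filter (fun y => !decide (a + 1 < y)) with hB
    have hsplit : (rest ++ B).Perm l := List.filter_append_perm _ l
    have haB : a ∈ B := by
      rw [hB, List.mem_filter]
      exact ⟨ha, by simp⟩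
    have hBlen : 1 ≤ B.length := by
      cases hBn : B with
      | nil => rw [hBn] at haB; cases haB
      | cons _ _ => simp
    have hlen : l.length = rest.length + B.length := by
      have := hsplit.length_eq
      simp only [List.length_append] at this
      omega
    have hml : gcountL l = 1 + gcountL rest := gcount_some hm
    have hrl : gcountL rest ≤ rest.length := gcount_le_length rest
    have hltl : rest.length < l.length := filter_min_lt_length hm
    set j := max (gcountL rest) (kk - B.length) with hj
    have hjr : j ≤ rest.length := by
      apply max_le hrl
      omega
    have hjk : j + 1 ≤ kk := by
      apply Nat.succ_le_of_lt
      apply max_lt <;> omega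
    obtain ⟨G₂, hG₂len, hG₂ok, hG₂perm⟩ := Epart_of_bounds (le_max_left _ _) hjr
    obtain ⟨Gs, hGslen, hGsne, hGsfl⟩ := splitList (kk - j) B (by omega) (by omega)
    refine ⟨Gs ++ G₂, by rw [List.length_append, hGslen, hG₂len]; omega, ?_, ?_⟩
    · intro g hg
      rcases List.mem_append.mp hg with h | h
      · refine ⟨hGsne g h, ?_⟩
        intro u hu v hv
        have huB : u ∈ B := by rw [← hGsfl]; exact List.mem_flatten.mpr ⟨g, h, hu⟩
        have hvB : v ∈ B := by rw [← hGsfl]; exact List.mem_flatten.mpr ⟨g, h, hv⟩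
        have hu1 : ¬ (a + 1 < u) := by
          rw [hB, List.mem_filter] at huB
          simpa using huB.2
        have hv1 : a ≤ v := by
          rw [hB, List.mem_filter] at hvB
          exact PySem.List.min?_isMin hm v hvB.1
        simp only at hv1
        omega
      · exact hG₂ok g h
    · rw [List.flatten_append, hGsfl]
      have s1 : (B ++ G₂.flatten).Perm (B ++ rest) := List.Perm.append_left B hG₂perm
      exact (s1.trans List.perm_append_comm).trans hsplit
termination_by l.length
decreasing_by exact hltl

theorem Epart_iff (kk : Nat) (l : List Int) :
    Epart kk l ↔ gcountL l ≤ kk ∧ kk ≤ l.length :=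
  ⟨fun h => ⟨Epart_mbound h, Epart_kbound h⟩, fun h => Epart_of_bounds h.1 h.2⟩

theorem go_eq_count_dropWhile (rest : List Int) (base : Int) :
    pvGreedyGo base rest = pvGreedyCount (rest.dropWhile (fun y => decide (y - base ≤ 1))) := by
  induction rest generalizing base with
  | nil => rfl
  | cons y rest ih =>
    by_cases hy : y - base ≤ 1
    · rw [List.dropWhile_cons_of_pos (by simpa using hy)]
      simp only [pvGreedyGo, if_pos hy]
      exact ih base
    · rw [List.dropWhile_cons_of_neg (by simpa using hy)]
      simp only [pvGreedyGo, if_neg hy, pvGreedyCount]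

theorem dropWhile_eq_filter_of_sorted {rest : List Int} (h : rest.Pairwise (· ≤ ·)) (a : Int) :
    rest.dropWhile (fun y => decide (y - a ≤ 1)) = rest.filter (fun y => decide (a + 1 < y)) := by
  induction rest with
  | nil => rfl
  | cons b r ih =>
    have hb : ∀ y ∈ r, b ≤ y := (List.pairwise_cons.mp h).1
    have hr : r.Pairwise (· ≤ ·) := (List.pairwise_cons.mp h).2
    by_cases hba : b - a ≤ 1
    · rw [List.dropWhile_cons_of_pos (by simpa using hba),
          List.filter_cons_of_neg (by simp only [decide_eq_true_eq]; omega)]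
      exact ih hr
    · rw [List.dropWhile_cons_of_neg (by simpa using hba),
          List.filter_cons_of_pos (by simp only [decide_eq_true_eq]; omega)]
      congr 1
      symm
      rw [List.filter_eq_self]
      intro y hy
      have := hb y hy
      simp only [decide_eq_true_eq]
      omega

theorem greedy_eq_gcount : ∀ (xs : List Int), xs.Pairwise (· ≤ ·) →
    pvGreedyCount xs = (gcountL xs : Int)
  | [], _ => by rw [gcount_nil]; rfl
  | a :: rest, h => by
    have hmin : ∀ y ∈ rest, a ≤ y := (List.pairwise_cons.mp h).1
    have hr : rest.Pairwise (· ≤ ·) := (List.pairwise_cons.mp h).2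
    have hm : PySem.List.min? (a :: rest) (fun y => y) = some a := by
      rw [PySem.List.min?_id_cons]
      have h1 := (PySem.List.foldl_min_le rest a).1
      rcases PySem.List.foldl_min_mem rest a with h2 | h2
      · rw [h2]
      · have := hmin _ h2
        have : rest.foldl min a = a := by omega
        rw [this]
    have hfa : (a :: rest).filter (fun y => decide (a + 1 < y)) =
        rest.filter (fun y => decide (a + 1 < y)) :=
      List.filter_cons_of_neg (by simp only [decide_eq_true_eq]; omega)
    have hsub : (rest.filter (fun y => decide (a + 1 < y))).Pairwise (· ≤ ·) :=
      hr.sublist List.filter_sublist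
    have hih := greedy_eq_gcount (rest.filter (fun y => decide (a + 1 < y))) hsub
    rw [gcount_some hm, hfa]
    show 1 + pvGreedyGo a rest = _
    rw [go_eq_count_dropWhile, dropWhile_eq_filter_of_sorted hr, hih]
    push_cast
    ring
termination_by xs => xs.length
decreasing_by
  have := List.length_filter_le (fun y => decide (a + 1 < y)) rest
  simp only [List.length_cons]
  omega

theorem alt_iff (k : Int) (x : List Int) (n : Int) (hn : 0 ≤ n) :
    check_if_partition_possible_alt k x n = true ↔
      (gcountL (x.take n.toNat) : Int) ≤ k ∧ k ≤ n := by
  unfold check_if_partition_possible_alt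
  rw [PySem.List.slice_to _ hn]
  set xs := PySem.List.sorted (x.take n.toNat) (fun y => y) false with hxs
  have hpw : xs.Pairwise (· ≤ ·) := PySem.List.sorted_pairwise (x.take n.toNat) (fun y => y)
  have hperm : xs.Perm (x.take n.toNat) := PySem.List.sorted_perm _ _ _
  rw [decide_eq_true_iff, greedy_eq_gcount xs hpw, gcount_perm hperm]

theorem mem_pvProd {pool : List Int} {m : Nat} {p : List Int} :
    p ∈ pvProd pool m ↔ p.length = m ∧ ∀ q ∈ p, q ∈ pool := by
  induction m generalizing p with
  | zero =>
    simp only [pvProd, List.mem_singleton]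
    constructor
    · rintro rfl; simp
    · rintro ⟨hl, -⟩; exact List.eq_nil_of_length_eq_zero hl
  | succ m ih =>
    simp only [pvProd, List.mem_flatMap, List.mem_map]
    constructor
    · rintro ⟨a, ha, t, ht, rfl⟩
      obtain ⟨htl, hte⟩ := ih.mp ht
      refine ⟨by simp [htl], ?_⟩
      intro q hq
      rcases List.mem_cons.mp hq with rfl | hq
      · exact ha
      · exact hte q hq
    · rintro ⟨hl, he⟩
      cases p with
      | nil => simp at hl
      | cons a t =>
        refine ⟨a, he a (by simp), t, ih.mpr ⟨by simpa using hl, fun q hq => he q (by simp [hq])⟩, rfl⟩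

theorem length_pvAppendAt (G : List (List Int)) (j v : Int) :
    (pvAppendAt G j v).length = G.length := by
  induction G generalizing j with
  | nil => rfl
  | cons g gs ih =>
    by_cases hj : j = 0
    · simp [pvAppendAt, hj]
    · simp [pvAppendAt, hj, ih]

theorem getElem_pvAppendAt (G : List (List Int)) (j v : Int) (i : Nat) (hi : i < G.length) :
    (pvAppendAt G j v)[i]'((length_pvAppendAt G j v).symm ▸ hi) =
      if (i : Int) = j then G[i] ++ [v] else G[i] := by
  induction G generalizing i j with
  | nil => simp at hi
  | cons g gs ih =>
    by_cases hj : j = 0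
    · subst hj
      cases i with
      | zero => simp [pvAppendAt]
      | succ i => simp [pvAppendAt]; omega
    · cases i with
      | zero =>
        simp only [pvAppendAt, if_neg hj]
        have h0 : ¬ (((0 : Nat) : Int) = j) := by
          simp only [Nat.cast_zero]
          exact fun h => hj h.symm
        rw [if_neg h0]
        simp
      | succ i =>
        simp only [pvAppendAt, if_neg hj]
        have hi' : i < gs.length := by simpa using hi
        have := ih (j - 1) i hi'
        simp only [List.getElem_cons_succ]
        rw [this]
        by_cases hij : (i : Int) = j - 1
        · rw [if_pos hij, if_pos (by omega)]
        · rw [if_neg hij, if_neg (by omega)]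

theorem zfold_nil (p : List Int) (G : List (List Int)) : zfold [] p G = G := rfl

theorem zfold_nil' (l : List Int) (G : List (List Int)) : zfold l [] G = G := by
  cases l <;> rfl

theorem zfold_cons (v q : Int) (l p : List Int) (G : List (List Int)) :
    zfold (v :: l) (q :: p) G = zfold l p (pvAppendAt G q v) := rfl

theorem length_zfold (l p : List Int) (G : List (List Int)) :
    (zfold l p G).length = G.length := by
  induction l generalizing p G with
  | nil => rfl
  | cons v l ih =>
    cases p with
    | nil => rw [zfold_nil']
    | cons q p => rw [zfold_cons, ih, length_pvAppendAt]

theorem agroup_nil (p : List Int) (j : Nat) : agroup [] p j = [] := rfl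

theorem agroup_nil' (l : List Int) (j : Nat) : agroup l [] j = [] := by
  cases l <;> rfl

theorem agroup_cons (v q : Int) (l p : List Int) (j : Nat) :
    agroup (v :: l) (q :: p) j =
      if q = (j : Int) then v :: agroup l p j else agroup l p j := by
  simp only [agroup, List.zip_cons_cons, List.filterMap_cons]
  by_cases h : q = (j : Int)
  · rw [if_pos h]; simp [h]
  · rw [if_neg h]; simp [h]

theorem getElem_zfold (l p : List Int) (G : List (List Int))
    (hp : ∀ q ∈ p, 0 ≤ q ∧ q < (G.length : Int)) (j : Nat) (hj : j < G.length) :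
    (zfold l p G)[j]'((length_zfold l p G).symm ▸ hj) = G[j] ++ agroup l p j := by
  induction l generalizing p G with
  | nil => simp [zfold_nil, agroup_nil]
  | cons v l ih =>
    cases p with
    | nil => simp [zfold_nil', agroup_nil']
    | cons q p =>
      have hq := hp q (by simp)
      simp only [zfold_cons, agroup_cons]
      have hG1len : (pvAppendAt G q v).length = G.length := length_pvAppendAt G q v
      have hj1 : j < (pvAppendAt G q v).length := by rw [hG1len]; exact hj
      have hstep := ih p (pvAppendAt G q v)
        (fun r hr => by rw [hG1len]; exact hp r (by simp [hr])) hj1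
      rw [hstep, getElem_pvAppendAt G q v j hj]
      by_cases hqj : q = (j : Int)
      · rw [if_pos hqj, if_pos hqj.symm, List.append_assoc]
        rfl
      · rw [if_neg hqj, if_neg (fun h => hqj h.symm)]

theorem flatten_pvAppendAt_perm (G : List (List Int)) (q v : Int)
    (hq : 0 ≤ q ∧ q < (G.length : Int)) :
    (pvAppendAt G q v).flatten.Perm (v :: G.flatten) := by
  induction G generalizing q with
  | nil => simp at hq; omega
  | cons g gs ih =>
    by_cases h0 : q = 0
    · subst h0
      show ((g ++ [v]) :: gs).flatten.Perm _
      simp only [List.flatten_cons, List.append_assoc, List.singleton_append]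
      exact List.perm_middle
    · simp only [pvAppendAt, if_neg h0, List.flatten_cons]
      have hq' : 0 ≤ q - 1 ∧ q - 1 < (gs.length : Int) := by
        simp only [List.length_cons] at hq
        push_cast at hq ⊢
        omega
      have := ih (q - 1) hq'
      exact (List.Perm.append_left g this).trans List.perm_middle

theorem flatten_zfold_perm (l p : List Int) (G : List (List Int))
    (hp : ∀ q ∈ p, 0 ≤ q ∧ q < (G.length : Int)) (hl : l.length ≤ p.length) :
    (zfold l p G).flatten.Perm (l ++ G.flatten) := by
  induction l generalizing p G with
  | nil => rw [zfold_nil]; simp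
  | cons v l ih =>
    cases p with
    | nil => simp at hl
    | cons q p =>
      have hq := hp q (by simp)
      rw [zfold_cons]
      have hG1len : (pvAppendAt G q v).length = G.length := length_pvAppendAt G q v
      have hstep := ih p (pvAppendAt G q v)
        (fun r hr => by rw [hG1len]; exact hp r (by simp [hr])) (by simp only [List.length_cons] at hl; omega)
      have h2 : (l ++ (pvAppendAt G q v).flatten).Perm (l ++ v :: G.flatten) :=
        List.Perm.append_left l (flatten_pvAppendAt_perm G q v hq)
      refine (hstep.trans h2).trans ?_
      exact List.perm_middle

theorem zfold_append_singleton (l p : List Int) (hlen : l.length = p.length)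
    (v q : Int) (G : List (List Int)) :
    zfold (l ++ [v]) (p ++ [q]) G = pvAppendAt (zfold l p G) q v := by
  unfold zfold
  rw [List.zip_append hlen, List.foldl_append]
  rfl

theorem pvAssign_eq_zfold (x p : List Int) (k : Int) (m : Nat)
    (hx : m ≤ x.length) (hp : m ≤ p.length) :
    pvAssign x p k m = zfold (x.take m) (p.take m) (List.replicate k.toNat []) := by
  induction m with
  | zero => simp [pvAssign, zfold_nil]
  | succ m ih =>
    have hx' : m < x.length := by omega
    have hp' : m < p.length := by omega
    unfold pvAssign
    rw [List.range_succ, List.foldl_append]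
    have hprev : (List.range m).foldl
        (fun G (i : Nat) => pvAppendAt G ((PySem.List.pyGet? p (i : Int)).getD 0)
          ((PySem.List.pyGet? x (i : Int)).getD 0))
        (List.replicate k.toNat []) = zfold (x.take m) (p.take m) (List.replicate k.toNat []) := by
      have := ih (by omega) (by omega)
      unfold pvAssign at this
      exact this
    rw [hprev]
    simp only [List.foldl_cons, List.foldl_nil]
    have hgp : (PySem.List.pyGet? p (m : Int)).getD 0 = p[m] := by
      rw [PySem.List.pyGet?_natCast, List.getElem?_eq_getElem hp']
      rfl
    have hgx : (PySem.List.pyGet? x (m : Int)).getD 0 = x[m] := by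
      rw [PySem.List.pyGet?_natCast, List.getElem?_eq_getElem hx']
      rfl
    rw [hgp, hgx]
    rw [List.take_add_one, List.take_add_one,
        List.getElem?_eq_getElem hx', List.getElem?_eq_getElem hp']
    simp only [Option.toList_some]
    have hlen : (x.take m).length = (p.take m).length := by
      simp only [List.length_take]
      omega
    rw [zfold_append_singleton _ _ hlen]

theorem diam_iff {g : List Int} (hg : g ≠ []) :
    (PySem.List.max? g (fun y => y)).getD 0 - (PySem.List.min? g (fun y => y)).getD 0 ≤ 1 ↔
      diampred g := by
  cases hM : PySem.List.max? g (fun y => y) with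
  | none => rw [PySem.List.max?_eq_none_iff] at hM; exact absurd hM hg
  | some M =>
    cases hm : PySem.List.min? g (fun y => y) with
    | none => rw [PySem.List.min?_eq_none_iff] at hm; exact absurd hm hg
    | some m =>
      simp only [Option.getD_some]
      have hMg : M ∈ g := PySem.List.max?_mem hM
      have hmg : m ∈ g := PySem.List.min?_mem hm
      have hMax : ∀ y ∈ g, y ≤ M := fun y hy => PySem.List.max?_isMax hM y hy
      have hMin : ∀ y ∈ g, m ≤ y := fun y hy => PySem.List.min?_isMin hm y hy
      constructor
      · intro h u hu v hv
        have h1 := hMax u hu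
        have h2 := hMin v hv
        simp only at h1 h2
        omega
      · intro h
        have := h M hMg m hmg
        omega

theorem groupOk_iff (g : List Int) :
    ((!(g.isEmpty || decide (1 < (PySem.List.max? g (fun y => y)).getD 0 -
        (PySem.List.min? g (fun y => y)).getD 0))) = true) ↔ (g ≠ [] ∧ diampred g) := by
  by_cases hg : g = []
  · subst hg
    simp
  · rw [Bool.not_eq_true', Bool.or_eq_false_iff]
    constructor
    · rintro ⟨-, h2⟩
      refine ⟨hg, (diam_iff hg).mp ?_⟩
      simp only [decide_eq_false_iff_not, not_lt] at h2
      omega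
    · rintro ⟨-, h⟩
      refine ⟨by simpa using hg, ?_⟩
      have := (diam_iff hg).mpr h
      simp only [decide_eq_false_iff_not, not_lt]
      omega

theorem pvGood_iff (k : Int) (G : List (List Int)) (hk : 0 < k) (hG : G.length = k.toNat) :
    pvGood k G = true ↔ ∀ j, (hj : j < G.length) → G[j] ≠ [] ∧ diampred G[j] := by
  unfold pvGood
  rw [List.all_eq_true]
  constructor
  · intro hall j hj
    have hjk : (j : Int) < k := by rw [hG] at hj; omega
    have hmem : (j : Int) ∈ PySem.List.pyRange 0 k 1 :=
      PySem.List.mem_pyRange_one.mpr ⟨by positivity, hjk⟩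
    have hthis := hall _ hmem
    simp only [PySem.List.pyGet?_natCast, List.getElem?_eq_getElem hj, Option.getD_some] at hthis
    exact (groupOk_iff _).mp hthis
  · intro h i hi
    obtain ⟨h0, hik⟩ := PySem.List.mem_pyRange_one.mp hi
    have hj : i.toNat < G.length := by rw [hG]; omega
    have hIdx : i = (i.toNat : Int) := by omega
    rw [hIdx]
    simp only [PySem.List.pyGet?_natCast, List.getElem?_eq_getElem hj, Option.getD_some]
    exact (groupOk_iff _).mpr (h i.toNat hj)

theorem build (l : List Int) (R : List (List Int)) (h : R.flatten.Perm l) :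
    ∃ p : List Int, p.length = l.length ∧ (∀ q ∈ p, 0 ≤ q ∧ q < (R.length : Int)) ∧
      ∀ j, (hj : j < R.length) → (agroup l p j).Perm R[j] := by
  induction l generalizing R with
  | nil =>
    refine ⟨[], rfl, by simp, ?_⟩
    intro j hj
    have hfl : R.flatten = [] := h.eq_nil
    have hnil := (List.flatten_eq_nil_iff.mp hfl) R[j] (List.getElem_mem hj)
    rw [agroup_nil, hnil]
  | cons v l ih =>
    have hv : v ∈ R.flatten := h.mem_iff.mpr (by simp)
    obtain ⟨g, hgR, hvg⟩ := List.mem_flatten.mp hv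
    obtain ⟨j0, hj0, hgj⟩ := List.mem_iff_getElem.mp hgR
    have hR'len : (R.set j0 (g.erase v)).length = R.length := by simp
    have hsplit : R = R.take j0 ++ g :: R.drop (j0 + 1) := by
      conv_lhs => rw [← List.take_append_drop j0 R, ← List.getElem_cons_drop hj0]
      rw [hgj]
    have hsplit' : R.set j0 (g.erase v) = R.take j0 ++ (g.erase v) :: R.drop (j0 + 1) := by
      rw [List.set_eq_take_append_cons_drop, if_pos hj0]
    have hflR : R.flatten.Perm (v :: (R.set j0 (g.erase v)).flatten) := by
      rw [hsplit', List.flatten_append, List.flatten_cons]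
      conv_lhs => rw [hsplit]
      rw [List.flatten_append, List.flatten_cons]
      have hg' : g.Perm (v :: g.erase v) := List.perm_cons_erase hvg
      have h1 : (g ++ (R.drop (j0 + 1)).flatten).Perm
          ((v :: g.erase v) ++ (R.drop (j0 + 1)).flatten) := hg'.append_right _
      have h2 := List.Perm.append_left (R.take j0).flatten h1
      refine h2.trans ?_
      exact List.perm_middle
    have hl' : (R.set j0 (g.erase v)).flatten.Perm l := (hflR.symm.trans h).cons_inv
    obtain ⟨p', hp'len, hp'ent, hp'gr⟩ := ih (R.set j0 (g.erase v)) hl'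
    refine ⟨(j0 : Int) :: p', by simp [hp'len], ?_, ?_⟩
    · intro q hq
      rcases List.mem_cons.mp hq with rfl | hq
      · exact ⟨by positivity, by exact_mod_cast hj0⟩
      · have := hp'ent q hq
        rwa [hR'len] at this
    · intro j hj
      rw [agroup_cons]
      by_cases hjj : (j0 : Int) = (j : Int)
      · have hjeq : j0 = j := by exact_mod_cast hjj
        subst hjeq
        rw [if_pos rfl]
        have hset : (R.set j0 (g.erase v))[j0]'(by rw [hR'len]; exact hj0) = g.erase v :=
          List.getElem_set_self _
        have hpj := hp'gr j0 (by rw [hR'len]; exact hj0)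
        rw [hset] at hpj
        rw [hgj]
        exact (hpj.cons v).trans (List.perm_cons_erase hvg).symm
      · rw [if_neg hjj]
        have hj0j : j0 ≠ j := fun hh => hjj (by rw [hh])
        have hpj := hp'gr j (by rw [hR'len]; exact hj)
        rwa [List.getElem_set_ne hj0j] at hpj

theorem A_iff_Epart (k : Int) (x : List Int) (n : Int) (hk : 0 < k) (hn : 0 ≤ n)
    (hnx : n ≤ (x.length : Int)) :
    check_if_partition_possible k x n = true ↔ Epart k.toNat (x.take n.toNat) := by
  have hKk : (k.toNat : Int) = k := Int.toNat_of_nonneg (le_of_lt hk)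
  have hNx : n.toNat ≤ x.length := by omega
  have hlN : (x.take n.toNat).length = n.toNat := by rw [List.length_take]; omega
  unfold check_if_partition_possible
  rw [List.any_eq_true]
  constructor
  · rintro ⟨p, hpmem, hpgood⟩
    obtain ⟨hplen, hpent⟩ := mem_pvProd.mp hpmem
    have hent : ∀ q ∈ p, 0 ≤ q ∧ q < ((List.replicate k.toNat ([] : List Int)).length : Int) := by
      intro q hq
      have := PySem.List.mem_pyRange_one.mp (hpent q hq)
      rw [List.length_replicate, hKk]
      exact this
    have hassign : pvAssign x p k n.toNat =
        zfold (x.take n.toNat) p (List.replicate k.toNat []) := by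
      have h1 := pvAssign_eq_zfold x p k n.toNat hNx (le_of_eq hplen.symm)
      rwa [List.take_of_length_le (le_of_eq hplen)] at h1
    rw [hassign] at hpgood
    have hGlen : (zfold (x.take n.toNat) p (List.replicate k.toNat [])).length = k.toNat := by
      rw [length_zfold, List.length_replicate]
    have hgood := (pvGood_iff k _ hk hGlen).mp hpgood
    refine ⟨zfold (x.take n.toNat) p (List.replicate k.toNat []), hGlen, ?_, ?_⟩
    · intro g hg
      obtain ⟨j, hj, hgj⟩ := List.mem_iff_getElem.mp hg
      rw [← hgj]
      exact hgood j hj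
    · have := flatten_zfold_perm (x.take n.toNat) p (List.replicate k.toNat []) hent
        (by rw [hlN, hplen])
      simpa using this
  · rintro ⟨G₀, hG0len, hok, hperm⟩
    obtain ⟨p, hplen, hpent, hpgr⟩ := build (x.take n.toNat) G₀ hperm
    have hplN : p.length = n.toNat := by rw [hplen, hlN]
    refine ⟨p, mem_pvProd.mpr ⟨hplN, ?_⟩, ?_⟩
    · intro q hq
      have := hpent q hq
      rw [hG0len, hKk] at this
      exact PySem.List.mem_pyRange_one.mpr this
    · have hent : ∀ q ∈ p, 0 ≤ q ∧ q < ((List.replicate k.toNat ([] : List Int)).length : Int) := by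
        intro q hq
        have := hpent q hq
        rwa [hG0len, ← List.length_replicate (n := k.toNat) (a := ([] : List Int))] at this
      have hassign : pvAssign x p k n.toNat =
          zfold (x.take n.toNat) p (List.replicate k.toNat []) := by
        have h1 := pvAssign_eq_zfold x p k n.toNat hNx (le_of_eq hplN.symm)
        rwa [List.take_of_length_le (le_of_eq hplN)] at h1
      rw [hassign]
      have hGlen : (zfold (x.take n.toNat) p (List.replicate k.toNat [])).length = k.toNat := by
        rw [length_zfold, List.length_replicate]
      apply (pvGood_iff k _ hk hGlen).mpr
      intro j hj
      rw [hGlen] at hj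
      have hjrep : j < (List.replicate k.toNat ([] : List Int)).length := by
        rw [List.length_replicate]; exact hj
      have hzg := getElem_zfold (x.take n.toNat) p (List.replicate k.toNat []) hent j hjrep
      have hrep : (List.replicate k.toNat ([] : List Int))[j]'hjrep = [] :=
        List.getElem_replicate _
      rw [hrep, List.nil_append] at hzg
      have hjG0 : j < G₀.length := by rw [hG0len]; exact hj
      have hpj := hpgr j hjG0
      have hokj := hok (G₀[j]'hjG0) (List.getElem_mem hjG0)
      constructor
      · rw [hzg]
        intro hnil
        rw [hnil] at hpj
        exact hokj.1 hpj.symm.eq_nil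
      · rw [hzg]
        intro u hu w hw
        exact hokj.2 u (hpj.mem_iff.mp hu) w (hpj.mem_iff.mp hw)

theorem A_kneg (k : Int) (x : List Int) (n : Int) (hk : k ≤ 0) (hn : 0 ≤ n) :
    check_if_partition_possible k x n = (decide (n = 0) : Bool) := by
  have hpool : PySem.List.pyRange 0 k 1 = [] := PySem.List.pyRange_one_eq_nil hk
  have hKt : k.toNat = 0 := by omega
  unfold check_if_partition_possible
  rw [hpool]
  by_cases h0 : n = 0
  · subst h0
    simp only [Int.toNat_zero, pvProd, List.any_cons, List.any_nil, Bool.or_false]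
    have h1 : pvAssign x [] k 0 = [] := by
      simp [pvAssign, hKt]
    rw [h1]
    have h2 : pvGood k [] = true := by
      unfold pvGood
      rw [hpool]
      rfl
    rw [h2]
    simp
  · have hnt : n.toNat ≠ 0 := by omega
    obtain ⟨t, ht⟩ := Nat.exists_eq_succ_of_ne_zero hnt
    rw [ht]
    simp only [pvProd, List.flatMap_nil, List.any_nil]
    simp [h0]

-- ===== VERDICT (by name: the statement is the Claim_ definition above) =====
theorem check_if_partition_possible_spec : Claim_unchanged_check_if_partition_possible := by
  intro k x n hdom hpre hnD
  obtain ⟨hn, hrest⟩ := hpre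
  by_cases hk : 0 < k
  · have hnx : n ≤ (x.length : Int) := by
      rcases hrest with h | ⟨h, -⟩
      · exact h
      · omega
    have hA := A_iff_Epart k x n hk hn hnx
    have hB := alt_iff k x n hn
    have hlN : (x.take n.toNat).length = n.toNat := by rw [List.length_take]; omega
    rw [Epart_iff, hlN] at hA
    rw [Bool.eq_iff_iff, hA, hB]
    constructor
    · rintro ⟨h1, h2⟩
      exact ⟨by omega, by omega⟩
    · rintro ⟨h1, h2⟩
      exact ⟨by omega, by omega⟩
  · rw [not_lt] at hk
    have hA := A_kneg k x n hk hn
    by_cases h0 : n = 0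
    · have hk0 : k = 0 := by
        rcases lt_or_eq_of_le hk with hlt | heq
        · exact absurd ⟨hlt, h0⟩ hnD
        · exact heq
      subst hk0
      subst h0
      have hB := alt_iff 0 x 0 (le_refl 0)
      have h1 : x.take (0 : Int).toNat = [] := by simp
      rw [h1, gcount_nil] at hB
      have hBt : check_if_partition_possible_alt 0 x 0 = true := hB.mpr (by simp)
      rw [hA, hBt]
      simp
    · have hAf : check_if_partition_possible k x n = false := by
        rw [hA]
        simp [h0]
      have hB := alt_iff k x n hn
      have hBf : check_if_partition_possible_alt k x n = false := by
        cases halt : check_if_partition_possible_alt k x n with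
        | false => rfl
        | true =>
          exfalso
          obtain ⟨hle, hkn⟩ := hB.mp halt
          by_cases hx : x = []
          · have hkneg : k < 0 := by
              rcases hrest with hlen | ⟨hk2, hne0⟩
              · exfalso
                subst hx
                simp at hlen
                omega
              · rcases lt_or_eq_of_le hk2 with hlt | heq
                · exact hlt
                · exact absurd ⟨heq, hx⟩ hne0
            subst hx
            rw [show List.take n.toNat ([] : List Int) = [] from by simp, gcount_nil] at hle
            omega
          · have hne : x.take n.toNat ≠ [] := by
              intro hnil
              have hlt : (x.take n.toNat).length = min n.toNat x.length := List.length_take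
              rw [hnil] at hlt
              simp only [List.length_nil] at hlt
              have hx0 : x.length ≠ 0 := fun hz => hx (List.eq_nil_of_length_eq_zero hz)
              omega
            have hm := gcount_pos hne
            omega
      rw [hAf, hBf]

theorem check_if_partition_possible_changed : Claim_changed_check_if_partition_possible := by
  unfold Claim_changed_check_if_partition_possible; decide

theorem check_if_partition_possible_tight : Claim_exact_check_if_partition_possible := by
  intro k x n hdom hpre hD
  obtain ⟨hkneg, h0⟩ := hD
  subst h0
  have hA := A_kneg k x 0 (le_of_lt hkneg) (le_refl 0)
  have hAt : check_if_partition_possible k x 0 = true := by rw [hA]; simp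
  have hB := alt_iff k x 0 (le_refl 0)
  have h1 : x.take (0 : Int).toNat = [] := by simp
  rw [h1, gcount_nil] at hB
  have hBf : check_if_partition_possible_alt k x 0 = false := by
    cases halt : check_if_partition_possible_alt k x 0 with
    | false => rfl
    | true =>
      obtain ⟨h2, h3⟩ := hB.mp halt
      omega
  rw [hAt, hBf]
  simp
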